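-- pv_equiv track=rewrite | github.com/neo4u/neophyte | sandbox/word_ladder_ii.py | findLadders
-- ===== SOURCE A (Python) =====
-- import collections
--
-- def findLadders(beginWord, endWord, wordList):
--     wordList = set(wordList)
--     res = []
--     q = {}
--     q[beginWord] = [[beginWord]]
--
--     while q:
--         newlayer = collections.defaultdict(list)
--         for w in q:
--             if w == endWord: res.extend(k for k in q[w])
--             else:
--                 for i in range(len(w)):
--                     for c in 'abcdefghijklmnopqrstuvwxyz':
--                         neww = w[:i] + c + w[i + 1:]
--                         if neww in wordList:
--                             newlayer[neww] += [j + [neww] for j in q[w]]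
--
--         wordList -= set(newlayer.keys())
--         q = newlayer
--
--     return res
-- ===== SOURCE B (Python) =====
-- def findLadders(beginWord, endWord, wordList):
--     # BFS over words only (no path copying), early stop at endWord's layer,
--     # then reconstruct all paths from the per-layer predecessor maps.
--     words = set(wordList)
--     frontier = [beginWord]
--     layers = []  # layers[k] maps each word of layer k+1 to its ordered parent list in layer k
--     while frontier and endWord not in frontier:
--         parents = {}
--         for w in frontier:
--             for i in range(len(w)):
--                 for c in 'abcdefghijklmnopqrstuvwxyz':
--                     nw = w[:i] + c + w[i + 1:]
--                     if nw in words: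
--                         parents[nw] = parents.get(nw, []) + [w]
--         words -= set(parents)
--         frontier = list(parents)
--         layers.append(parents)
--     if endWord not in frontier:
--         return []
--     def build(k, w):
--         if k == 0:
--             return [[w]]
--         return [p + [w] for par in layers[k - 1][w] for p in build(k - 1, par)]
--     return build(len(layers), endWord)
-- ===== Notes on version B (the rewrite author's own statement) =====
-- stated objective: alternative
-- what changed: B runs the layered BFS over words only, recording per-layer predecessor lists, stops as soon as endWord's layer is reached, and reconstructs the result paths afterwards, instead of A's carrying and copying every partial path through every layer and exploring all layers to exhaustion; it avoids A's per-layer path copying, though on the timed inputs the shared neighbour-generation cost dominates.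
import Mathlib
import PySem

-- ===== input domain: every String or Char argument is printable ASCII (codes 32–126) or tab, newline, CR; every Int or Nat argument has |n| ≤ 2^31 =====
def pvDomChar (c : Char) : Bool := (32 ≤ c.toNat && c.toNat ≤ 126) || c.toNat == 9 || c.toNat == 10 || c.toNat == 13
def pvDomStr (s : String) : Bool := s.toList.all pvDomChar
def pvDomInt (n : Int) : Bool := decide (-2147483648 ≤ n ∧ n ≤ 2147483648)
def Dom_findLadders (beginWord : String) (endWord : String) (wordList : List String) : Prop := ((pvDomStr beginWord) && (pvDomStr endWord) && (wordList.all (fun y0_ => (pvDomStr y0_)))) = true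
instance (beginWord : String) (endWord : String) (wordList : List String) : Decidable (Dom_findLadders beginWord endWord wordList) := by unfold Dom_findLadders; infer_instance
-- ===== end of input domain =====

-- A = layered BFS carrying every partial path; B = BFS over words only with per-layer
-- predecessor lists, early stop at endWord's layer, path reconstruction afterwards.

-- ===== PORT A =====
-- 'abcdefghijklmnopqrstuvwxyz'
def pvAlphaA : List Char := "abcdefghijklmnopqrstuvwxyz".toList

-- w[:i] + c + w[i+1:]  (string slicing/concatenation, exact via PySem.List.slice on the code points)
def pvMutA (w : String) (i : Int) (c : Char) : String :=
  String.ofList (PySem.List.slice w.toList none (some i) ++ c :: PySem.List.slice w.toList (some (i + 1)) none)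

-- the two inner 'for' loops of A: for i in range(len(w)): for c in '…': if neww in wordList: newlayer[neww] += [j + [neww] for j in q[w]]
def pvExpandA (wl : PySem.Set String) (w : String) (ps : List (List String))
    (nl : PySem.Dict String (List (List String))) : PySem.Dict String (List (List String)) :=
  (PySem.List.pyRange 0 (PySem.Str.len w) 1).foldl (fun nl i =>
    pvAlphaA.foldl (fun nl c =>
      let neww := pvMutA w i c
      if PySem.Set.contains wl neww then
        nl.insert neww (nl.getD neww [] ++ ps.map (fun j => j ++ [neww]))
      else nl) nl) nl

-- the 'while q:' loop; fuel (wordList.length + 2) is a pure totality guard: each body run with a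
-- nonempty new layer removes at least one word from the set, so the fuel is never exhausted
def pvLoopA (endWord : String) : Nat → PySem.Dict String (List (List String)) → PySem.Set String →
    List (List String) → List (List String)
  | 0, _, _, res => res
  | fuel + 1, q, wl, res =>
    if q.items.isEmpty then res
    else
      let st := q.items.foldl
        (fun (st : List (List String) × PySem.Dict String (List (List String))) p =>
          if p.1 == endWord then (st.1 ++ p.2, st.2)
          else (st.1, pvExpandA wl p.1 p.2 st.2)) (res, PySem.Dict.empty)
      pvLoopA endWord fuel st.2 (PySem.Set.diff wl st.2.keys) st.1

def findLadders (beginWord : String) (endWord : String) (wordList : List String) :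
    List (List String) :=
  pvLoopA endWord (wordList.length + 2) (PySem.Dict.empty.insert beginWord [[beginWord]])
    (PySem.Set.ofList wordList) []

-- ===== PORT B =====
def pvAlphaB : List Char := "abcdefghijklmnopqrstuvwxyz".toList

-- w[:i] + c + w[i+1:]
def pvMutB (w : String) (i : Int) (c : Char) : String :=
  String.ofList (PySem.List.slice w.toList none (some i) ++ c :: PySem.List.slice w.toList (some (i + 1)) none)

-- B's inner loops: parents[nw] = parents.get(nw, []) + [w]
def pvExpandB (wl : PySem.Set String) (w : String)
    (pr : PySem.Dict String (List String)) : PySem.Dict String (List String) :=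
  (PySem.List.pyRange 0 (PySem.Str.len w) 1).foldl (fun pr i =>
    pvAlphaB.foldl (fun pr c =>
      let nw := pvMutB w i c
      if PySem.Set.contains wl nw then pr.insert nw (pr.getD nw [] ++ [w]) else pr) pr) pr

-- 'while frontier and endWord not in frontier:'; same totality fuel as A's loop
def pvLoopB (endWord : String) : Nat → List String → PySem.Set String →
    List (PySem.Dict String (List String)) →
    List String × List (PySem.Dict String (List String))
  | 0, _, _, layers => ([], layers)
  | fuel + 1, frontier, wl, layers =>
    if frontier.isEmpty || frontier.contains endWord then (frontier, layers)
    else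
      let pr := frontier.foldl (fun pr w => pvExpandB wl w pr) PySem.Dict.empty
      pvLoopB endWord fuel pr.keys (PySem.Set.diff wl pr.keys) (layers ++ [pr])

-- build(k, w); layers[k-1][w] is always in range/present when called, List.getD/Dict.getD are totality guards
def pvBuildB (layers : List (PySem.Dict String (List String))) : Nat → String → List (List String)
  | 0, w => [[w]]
  | k + 1, w =>
    ((layers.getD k PySem.Dict.empty).getD w []).flatMap
      (fun par => (pvBuildB layers k par).map (fun p => p ++ [w]))

def findLadders_alt (beginWord : String) (endWord : String) (wordList : List String) :
    List (List String) :=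
  let r := pvLoopB endWord (wordList.length + 2) [beginWord] (PySem.Set.ofList wordList) []
  if r.1.contains endWord then pvBuildB r.2 r.2.length endWord else []

-- ===== PRECONDITION & SPEC =====
def Spec_findLadders (beginWord : String) (endWord : String) (wordList : List String) (out : List (List String)) : Prop := out = findLadders_alt beginWord endWord wordList
instance (beginWord : String) (endWord : String) (wordList : List String) (out : List (List String)) : Decidable (Spec_findLadders beginWord endWord wordList out) := by unfold Spec_findLadders; infer_instance

-- ===== CLAIM (what is proved, stated in full; the proofs are below) =====
def Claim_equal_findLadders : Prop := ∀ (beginWord : String) (endWord : String) (wordList : List String), Dom_findLadders beginWord endWord wordList → Spec_findLadders beginWord endWord wordList (findLadders beginWord endWord wordList)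

-- ===== LEMMAS AND PROOFS =====

-- proof-side views of the two expansion loops: a single fold over the generated candidate words
def pvCand (w : String) : List String :=
  (PySem.List.pyRange 0 (PySem.Str.len w) 1).flatMap (fun i => pvAlphaA.map (fun c => pvMutA w i c))

def pvStepA (wl : PySem.Set String) (ps : List (List String))
    (nl : PySem.Dict String (List (List String))) (u : String) :
    PySem.Dict String (List (List String)) :=
  if PySem.Set.contains wl u then nl.insert u (nl.getD u [] ++ ps.map (fun j => j ++ [u])) else nl

def pvStepB (wl : PySem.Set String) (w : String)
    (pr : PySem.Dict String (List String)) (u : String) : PySem.Dict String (List String) :=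
  if PySem.Set.contains wl u then pr.insert u (pr.getD u [] ++ [w]) else pr

theorem pvNestedFold {δ : Type} (w : String) (f : δ → String → δ) (a : δ) :
    (PySem.List.pyRange 0 (PySem.Str.len w) 1).foldl
      (fun d i => pvAlphaA.foldl (fun d c => f d (pvMutA w i c)) d) a
    = (pvCand w).foldl f a := by
  unfold pvCand
  induction (PySem.List.pyRange 0 (PySem.Str.len w) 1) generalizing a with
  | nil => rfl
  | cons i t ih => simp [List.foldl_append, List.foldl_map, ih]

theorem pvExpandA_eq (wl : PySem.Set String) (w : String) (ps : List (List String))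
    (nl : PySem.Dict String (List (List String))) :
    pvExpandA wl w ps nl = (pvCand w).foldl (pvStepA wl ps) nl :=
  pvNestedFold w (pvStepA wl ps) nl

theorem pvExpandB_eq (wl : PySem.Set String) (w : String)
    (pr : PySem.Dict String (List String)) :
    pvExpandB wl w pr = (pvCand w).foldl (pvStepB wl w) pr :=
  pvNestedFold w (pvStepB wl w) pr

-- the invariant tying A's path dictionary to B's predecessor dictionary
def pvRel (layers : List (PySem.Dict String (List String)))
    (N : PySem.Dict String (List (List String)))
    (P : PySem.Dict String (List String)) : Prop :=
  N.keys = P.keys ∧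
  ∀ u, N.getD u [] =
    (P.getD u []).flatMap (fun par => (pvBuildB layers layers.length par).map (fun p => p ++ [u]))

theorem pvStepRel {layers : List (PySem.Dict String (List String))} {wl : PySem.Set String}
    {w : String} {ps : List (List String)} {N P} (u : String)
    (hps : ps = pvBuildB layers layers.length w) (h : pvRel layers N P) :
    pvRel layers (pvStepA wl ps N u) (pvStepB wl w P u) := by
  obtain ⟨hk, hv⟩ := h
  unfold pvStepA pvStepB
  by_cases hc : PySem.Set.contains wl u = true
  · rw [if_pos hc, if_pos hc]
    constructor
    · by_cases hNu : N.contains u = true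
      · have hPu : P.contains u = true := by
          rw [PySem.Dict.contains_iff_mem_keys] at hNu ⊢; rw [← hk]; exact hNu
        rw [PySem.Dict.keys_insert_of_contains _ _ hNu,
            PySem.Dict.keys_insert_of_contains _ _ hPu, hk]
      · have hPu : P.contains u = false := by
          rw [Bool.eq_false_iff]
          intro hPc
          rw [PySem.Dict.contains_iff_mem_keys, ← hk,
              ← PySem.Dict.contains_iff_mem_keys] at hPc
          exact hNu hPc
        rw [PySem.Dict.keys_insert_of_not_contains _ _ (by simpa using hNu),
            PySem.Dict.keys_insert_of_not_contains _ _ hPu, hk]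
    · intro u'
      rw [PySem.Dict.getD_insert, PySem.Dict.getD_insert]
      by_cases he : u' = u
      · rw [if_pos he, if_pos he, List.flatMap_append, hv u, he]
        simp [hps]
      · rw [if_neg he, if_neg he, hv u']
  · rw [if_neg hc, if_neg hc]; exact ⟨hk, hv⟩

theorem pvFoldRel {layers wl w ps} (hps : ps = pvBuildB layers layers.length w) :
    ∀ (l : List String) N P, pvRel layers N P →
      pvRel layers (l.foldl (pvStepA wl ps) N) (l.foldl (pvStepB wl w) P)
  | [], _, _, h => h
  | u :: t, _, _, h => pvFoldRel hps t _ _ (pvStepRel u hps h)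

theorem pvExpandRel {layers wl w ps N P} (hps : ps = pvBuildB layers layers.length w)
    (h : pvRel layers N P) : pvRel layers (pvExpandA wl w ps N) (pvExpandB wl w P) := by
  rw [pvExpandA_eq, pvExpandB_eq]; exact pvFoldRel hps (pvCand w) N P h

theorem pvItemsRel {layers : List (PySem.Dict String (List String))} {wl : PySem.Set String} :
    ∀ (items : List (String × List (List String))) N P, pvRel layers N P →
      (∀ p ∈ items, p.2 = pvBuildB layers layers.length p.1) →
      pvRel layers (items.foldl (fun n p => pvExpandA wl p.1 p.2 n) N)
        (items.foldl (fun pr p => pvExpandB wl p.1 pr) P)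
  | [], _, _, h, _ => h
  | p :: t, _, _, h, hb =>
    pvItemsRel t _ _ (pvExpandRel (hb p List.mem_cons_self) h)
      (fun q hq => hb q (List.mem_cons_of_mem _ hq))

-- keys produced by the expansion folds: new keys are members of wl, Nodup is preserved
theorem pvFoldStepA_keys {wl ps} :
    ∀ (l : List String) (d : PySem.Dict String (List (List String))) (k : String),
      k ∈ (l.foldl (pvStepA wl ps) d).keys → k ∈ d.keys ∨ PySem.Set.contains wl k = true
  | [], _, _, h => Or.inl h
  | u :: t, d, k, h => by
    rcases pvFoldStepA_keys t _ k h with h' | h'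
    · unfold pvStepA at h'
      by_cases hc : PySem.Set.contains wl u = true
      · rw [if_pos hc] at h'
        rcases (PySem.Dict.mem_keys_insert _ _ _ _).mp h' with rfl | h''
        · exact Or.inr hc
        · exact Or.inl h''
      · rw [if_neg hc] at h'; exact Or.inl h'
    · exact Or.inr h'

theorem pvFoldStepA_nodup {wl ps} :
    ∀ (l : List String) (d : PySem.Dict String (List (List String))),
      d.keys.Nodup → (l.foldl (pvStepA wl ps) d).keys.Nodup
  | [], _, h => h
  | u :: t, d, h => by
    refine pvFoldStepA_nodup t _ ?_
    unfold pvStepA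
    by_cases hc : PySem.Set.contains wl u = true
    · rw [if_pos hc]; exact PySem.Dict.nodup_keys_insert _ _ _ h
    · rw [if_neg hc]; exact h

theorem pvNewlayerKeys {e : String} {wl : PySem.Set String} :
    ∀ (items : List (String × List (List String)))
      (N : PySem.Dict String (List (List String))) (k : String),
      k ∈ (items.foldl (fun n p => if p.1 == e then n else pvExpandA wl p.1 p.2 n) N).keys →
      k ∈ N.keys ∨ PySem.Set.contains wl k = true
  | [], _, _, h => Or.inl h
  | p :: t, N, k, h => by
    rcases pvNewlayerKeys t _ k h with h' | h'
    · beta_reduce at h'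
      by_cases hc : (p.1 == e) = true
      · rw [if_pos hc] at h'; exact Or.inl h'
      · rw [if_neg hc, pvExpandA_eq] at h'
        exact pvFoldStepA_keys _ _ _ h'
    · exact Or.inr h'

theorem pvNewlayerNodup {e : String} {wl : PySem.Set String} :
    ∀ (items : List (String × List (List String)))
      (N : PySem.Dict String (List (List String))), N.keys.Nodup →
      ((items.foldl (fun n p => if p.1 == e then n else pvExpandA wl p.1 p.2 n) N).keys).Nodup
  | [], _, h => h
  | p :: t, N, h => by
    refine pvNewlayerNodup t _ ?_
    beta_reduce
    by_cases hc : (p.1 == e) = true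
    · rw [if_pos hc]; exact h
    · rw [if_neg hc, pvExpandA_eq]; exact pvFoldStepA_nodup _ _ h

-- the pair-state fold of A's layer loop splits into its two components
theorem pvPairFold {e : String} {wl : PySem.Set String} :
    ∀ (items : List (String × List (List String))) (r : List (List String))
      (n : PySem.Dict String (List (List String))),
      items.foldl (fun st p => if p.1 == e then (st.1 ++ p.2, st.2)
          else (st.1, pvExpandA wl p.1 p.2 st.2)) (r, n)
      = (items.foldl (fun r p => if p.1 == e then r ++ p.2 else r) r,
         items.foldl (fun n p => if p.1 == e then n else pvExpandA wl p.1 p.2 n) n)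
  | [], _, _ => rfl
  | p :: t, r, n => by
    by_cases hc : (p.1 == e) = true <;>
      simp only [List.foldl_cons, if_pos, if_neg, hc, Bool.not_eq_true] <;>
      exact pvPairFold t _ _

-- the res component: no key equal to e leaves res unchanged; with Nodup keys e's entry is appended once
theorem pvResFold_none {e : String} :
    ∀ (items : List (String × List (List String))) (res : List (List String)),
      e ∉ items.map Prod.fst →
      items.foldl (fun r p => if p.1 == e then r ++ p.2 else r) res = res
  | [], _, _ => rfl
  | p :: t, res, h => by
    have hne : p.1 ≠ e := fun hh => h (by simp [hh])
    simp only [List.foldl_cons]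
    rw [if_neg (by simpa using hne)]
    exact pvResFold_none t res (fun hm => h (by simp at hm ⊢; tauto))

theorem pvResFold_one {e : String} {ps : List (List String)} :
    ∀ (items : List (String × List (List String))) (res : List (List String)),
      (items.map Prod.fst).Nodup → (e, ps) ∈ items →
      items.foldl (fun r p => if p.1 == e then r ++ p.2 else r) res = res ++ ps
  | [], _, _, hm => absurd hm List.not_mem_nil
  | p :: t, res, hnd, hm => by
    simp only [List.map_cons, List.nodup_cons] at hnd
    rcases List.mem_cons.mp hm with heq | hm'
    · have h1 : p.1 = e := by rw [← heq]
      have h2 : p.2 = ps := by rw [← heq]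
      simp only [List.foldl_cons]
      rw [if_pos (by simp [h1]), h2]
      exact pvResFold_none t _ (h1 ▸ hnd.1)
    · have hne : ¬ ((p.1 == e) = true) := by
        simp only [beq_iff_eq]
        rintro rfl
        exact hnd.1 (List.mem_map.mpr ⟨(p.1, ps), hm', rfl⟩)
      simp only [List.foldl_cons]
      rw [if_neg hne]
      exact pvResFold_one t res hnd.2 hm'

theorem pvLoopA_emptyDict (e : String) :
    ∀ (fuel : Nat) (wl : PySem.Set String) (res : List (List String)),
      pvLoopA e fuel PySem.Dict.empty wl res = res
  | 0, _, _ => rfl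
  | _ + 1, _, _ => rfl

theorem pvContains_diff_false {x : String} {s : PySem.Set String} {t : List String}
    (h : PySem.Set.contains s x = false) :
    PySem.Set.contains (PySem.Set.diff s t) x = false := by
  rw [Bool.eq_false_iff] at h ⊢
  intro hc
  exact h ((PySem.Set.contains_iff _ _).mpr
    ((PySem.Set.mem_diff _ _ _).mp ((PySem.Set.contains_iff _ _).mp hc)).1)

theorem pvContains_diff_self {x : String} {s : PySem.Set String} {t : List String}
    (h : x ∈ t) : PySem.Set.contains (PySem.Set.diff s t) x = false := by
  rw [Bool.eq_false_iff]
  intro hc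
  exact ((PySem.Set.mem_diff _ _ _).mp ((PySem.Set.contains_iff _ _).mp hc)).2 h

-- once endWord is out of the word set and out of the frontier, A's loop never touches res again
theorem pvNoMore (e : String) :
    ∀ (fuel : Nat) (q : PySem.Dict String (List (List String))) (wl : PySem.Set String)
      (res : List (List String)),
      PySem.Set.contains wl e = false → (∀ k ∈ q.keys, k ≠ e) →
      pvLoopA e fuel q wl res = res
  | 0, _, _, _, _, _ => rfl
  | fuel + 1, q, wl, res, hwl, hq => by
    show pvLoopA e (fuel + 1) q wl res = res
    rw [pvLoopA]
    by_cases hemp : q.items.isEmpty = true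
    · rw [if_pos hemp]
    · rw [if_neg hemp]
      show pvLoopA e fuel _ _ _ = res
      rw [pvPairFold]
      have hres : q.items.foldl (fun r p => if p.1 == e then r ++ p.2 else r) res = res :=
        pvResFold_none _ _ (fun hmem => (hq e hmem) rfl)
      rw [hres]
      refine pvNoMore e fuel _ _ _ (pvContains_diff_false hwl) ?_
      intro k hk
      rcases pvNewlayerKeys q.items _ k hk with h' | h'
      · rw [PySem.Dict.keys_empty] at h'; exact absurd h' List.not_mem_nil
      · intro heq; rw [heq, hwl] at h'; exact Bool.false_ne_true h'

-- build is unaffected by appending a new layer above the level it reads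
theorem pvBuild_append (layers : List (PySem.Dict String (List String)))
    (pr : PySem.Dict String (List String)) :
    ∀ (k : Nat) (w : String), k ≤ layers.length →
      pvBuildB (layers ++ [pr]) k w = pvBuildB layers k w
  | 0, _, _ => rfl
  | k + 1, w, h => by
    simp only [pvBuildB]
    rw [List.getD_append _ _ _ k (by omega)]
    exact List.flatMap_congr (fun par _ => by
      rw [pvBuild_append layers pr k par (by omega)])

-- build one level up, reading the freshly appended predecessor layer
theorem pvBuild_succ (layers : List (PySem.Dict String (List String)))
    (pr : PySem.Dict String (List String)) (u : String) :
    pvBuildB (layers ++ [pr]) (layers.length + 1) u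
      = (pr.getD u []).flatMap
          (fun par => (pvBuildB layers layers.length par).map (fun p => p ++ [u])) := by
  simp only [pvBuildB]
  rw [List.getD_eq_getElem?_getD, List.getElem?_concat_length]
  exact List.flatMap_congr (fun par _ => by
    rw [pvBuild_append layers pr layers.length par le_rfl])

-- the main loop correspondence: A's layered loop equals B's loop followed by reconstruction
theorem pvMain (e : String) :
    ∀ (fuel : Nat) (q : PySem.Dict String (List (List String))) (wl : PySem.Set String)
      (res : List (List String)) (layers : List (PySem.Dict String (List String))),
      q.keys.Nodup →
      (∀ p ∈ q.items, p.2 = pvBuildB layers layers.length p.1) →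
      ((∀ k ∈ q.keys, PySem.Set.contains wl k = false) ∨ ∃ x, q.keys = [x]) →
      pvLoopA e fuel q wl res =
        res ++ (let r := pvLoopB e fuel q.keys wl layers
                if r.1.contains e then pvBuildB r.2 r.2.length e else []) := by
  intro fuel
  induction fuel with
  | zero => intro q wl res layers _ _ _; simp [pvLoopA, pvLoopB]
  | succ fuel ih =>
    intro q wl res layers hnd hbuild hinv
    by_cases hemp : q.items.isEmpty = true
    · have hkeys : q.keys = [] := by
        simp only [PySem.Dict.keys]
        rw [List.isEmpty_iff.mp hemp, List.map_nil]
      rw [pvLoopA, if_pos hemp, hkeys]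
      simp [pvLoopB]
    · have hitems : q.items ≠ [] := fun h => hemp (List.isEmpty_iff.mpr h)
      have hkne : q.keys.isEmpty = false := by
        simp only [PySem.Dict.keys]
        rw [Bool.eq_false_iff]
        intro h
        exact hitems (List.map_eq_nil_iff.mp (List.isEmpty_iff.mp h))
      have hndk : (q.items.map Prod.fst).Nodup := hnd
      by_cases he : e ∈ q.keys
      · -- endWord's layer: A collects q[e] into res and B stops here
        have hcont : q.keys.contains e = true := List.contains_iff_mem.mpr he
        have hB : (let r := pvLoopB e (fuel + 1) q.keys wl layers
              if r.1.contains e then pvBuildB r.2 r.2.length e else [])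
            = pvBuildB layers layers.length e := by
          simp only [pvLoopB, hcont, Bool.or_true, if_true]
        rw [hB, pvLoopA, if_neg hemp]
        show pvLoopA e fuel _ _ _ = _
        rw [pvPairFold]
        obtain ⟨p, hp, hfst⟩ := List.mem_map.mp he
        have hpe : (e, p.2) ∈ q.items := by
          have hpp : p = (e, p.2) := by rw [← hfst]
          rw [← hpp]; exact hp
        have hres : q.items.foldl (fun r p => if p.1 == e then r ++ p.2 else r) res
            = res ++ p.2 := pvResFold_one q.items res hndk hpe
        rw [hres, hbuild (e, p.2) hpe]
        rcases hinv with hall | ⟨x, hx⟩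
        · refine pvNoMore e fuel _ _ _ (pvContains_diff_false (hall e he)) ?_
          intro k hk
          rcases pvNewlayerKeys q.items _ k hk with h' | h'
          · rw [PySem.Dict.keys_empty] at h'; exact absurd h' List.not_mem_nil
          · intro heq; rw [heq, hall e he] at h'; exact Bool.false_ne_true h'
        · -- the frontier is the single word e; no expansion happens at all
          have hxe : x = e := by
            rw [hx] at he
            rcases List.mem_cons.mp he with h | h
            · exact h.symm
            · exact absurd h List.not_mem_nil
          obtain ⟨pp, tt, hqi⟩ : ∃ pp tt, q.items = pp :: tt := by
            cases hq : q.items with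
            | nil => exact absurd hq hitems
            | cons pp tt => exact ⟨pp, tt, rfl⟩
          have hmap : q.items.map Prod.fst = [x] := hx
          rw [hqi] at hmap
          simp only [List.map_cons, List.cons.injEq] at hmap
          have htt : tt = [] := List.map_eq_nil_iff.mp hmap.2
          have hN : q.items.foldl
              (fun n p => if p.1 == e then n else pvExpandA wl p.1 p.2 n) PySem.Dict.empty
              = PySem.Dict.empty := by
            rw [hqi, htt]
            simp only [List.foldl_cons, List.foldl_nil]
            rw [if_pos (by simp [hmap.1.trans hxe])]
          rw [hN]
          exact pvLoopA_emptyDict e fuel _ _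
      · -- ordinary layer: both sides expand and recurse
        have hcont : q.keys.contains e = false := by
          rw [Bool.eq_false_iff]; intro h; exact he (List.contains_iff_mem.mp h)
        have hNif : q.items.foldl
            (fun n p => if p.1 == e then n else pvExpandA wl p.1 p.2 n) PySem.Dict.empty
            = q.items.foldl (fun n p => pvExpandA wl p.1 p.2 n) PySem.Dict.empty := by
          refine PySem.List.foldl_congr_mem _ _ _ _ ?_
          intro acc p hpmem
          refine if_neg ?_
          simp only [beq_iff_eq]
          intro hpe
          exact he (hpe ▸ List.mem_map_of_mem hpmem (f := Prod.fst))
        have hpr : q.keys.foldl (fun pr w => pvExpandB wl w pr) PySem.Dict.empty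
            = q.items.foldl (fun pr p => pvExpandB wl p.1 pr) PySem.Dict.empty := by
          simp only [PySem.Dict.keys]
          rw [List.foldl_map]
        set N := q.items.foldl (fun n p => pvExpandA wl p.1 p.2 n) PySem.Dict.empty with hNdef
        set P := q.items.foldl (fun pr p => pvExpandB wl p.1 pr) PySem.Dict.empty with hPdef
        have hrel : pvRel layers N P := by
          refine pvItemsRel q.items _ _ ⟨?_, ?_⟩ hbuild
          · rw [PySem.Dict.keys_empty, PySem.Dict.keys_empty]
          · intro u; rw [PySem.Dict.getD_empty, PySem.Dict.getD_empty]; rfl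
        have hNnd : N.keys.Nodup := hNif ▸ pvNewlayerNodup q.items PySem.Dict.empty
          (by rw [PySem.Dict.keys_empty]; exact List.nodup_nil)
        have hbuild' : ∀ p ∈ N.items, p.2 = pvBuildB (layers ++ [P])
            (layers ++ [P]).length p.1 := by
          intro p hpmem
          have hgd : N.getD p.1 [] = p.2 := by
            have hmem : (p.1, p.2) ∈ N.items := by simpa using hpmem
            exact PySem.Dict.getD_of_mem_items _ hmem hNnd []
          have hlen : (layers ++ [P]).length = layers.length + 1 := by simp
          rw [hlen, pvBuild_succ, ← hrel.2 p.1, hgd]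
        have hinv' : (∀ k ∈ N.keys, PySem.Set.contains (PySem.Set.diff wl N.keys) k = false)
            ∨ ∃ x, N.keys = [x] := Or.inl (fun k hk => pvContains_diff_self hk)
        have hB : (let r := pvLoopB e (fuel + 1) q.keys wl layers
              if r.1.contains e then pvBuildB r.2 r.2.length e else [])
            = (let r := pvLoopB e fuel N.keys (PySem.Set.diff wl N.keys) (layers ++ [P])
               if r.1.contains e then pvBuildB r.2 r.2.length e else []) := by
          simp only [pvLoopB, hkne, hcont, Bool.or_false, Bool.false_eq_true, if_false]
          rw [hpr, ← hrel.1]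
        rw [hB, pvLoopA, if_neg hemp]
        show pvLoopA e fuel _ _ _ = _
        rw [pvPairFold]
        have hres : q.items.foldl (fun r p => if p.1 == e then r ++ p.2 else r) res = res :=
          pvResFold_none _ _ (fun hm => he hm)
        rw [hres, hNif]
        exact ih N (PySem.Set.diff wl N.keys) res (layers ++ [P]) hNnd hbuild' hinv'

-- ===== VERDICT (by name: the statement is the Claim_ definition above) =====
theorem findLadders_spec : Claim_equal_findLadders := by
  unfold Claim_equal_findLadders
  intro beginWord endWord wordList _
  unfold Spec_findLadders findLadders findLadders_alt
  have hitems : (PySem.Dict.empty.insert beginWord [[beginWord]]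
      : PySem.Dict String (List (List String))).items = [(beginWord, [[beginWord]])] := by
    rw [PySem.Dict.items_insert_of_not_contains _ _ (PySem.Dict.contains_empty beginWord)]
    rfl
  have hkeys : (PySem.Dict.empty.insert beginWord [[beginWord]]
      : PySem.Dict String (List (List String))).keys = [beginWord] := by
    simp only [PySem.Dict.keys, hitems]
    rfl
  rw [pvMain endWord (wordList.length + 2) _ _ [] []
    (by rw [hkeys]; exact List.nodup_singleton beginWord)
    (by
      intro p hp
      rw [hitems] at hp
      rcases List.mem_cons.mp hp with rfl | h
      · rfl
      · exact absurd h List.not_mem_nil)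
    (Or.inr ⟨beginWord, hkeys⟩)]
  rw [hkeys]
  simp
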